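-- pv_equiv track=rewrite | github.com/konszymanski/leetcode-dataset | obfuscated_solutions/python/2169-count-operations-to-obtain-zero/solution_1_loop_flatten.py | countOperations
-- ===== SOURCE A (Python) =====
-- def countOperations(num1: int, num2: int) ->int:
--     res = 0
--     while True:
--         if not (num1 and num2):
--             break
--         res += num1 // num2
--         num1 %= num2
--         num1, num2 = num2, num1
--     return res
-- ===== SOURCE B (Python) =====
-- def countOperations(num1: int, num2: int) -> int:
--     # Direct recursion over the Euclidean reduction; no accumulator.
--     if num1 == 0 or num2 == 0:
--         return 0
--     return num1 // num2 + countOperations(num2, num1 % num2)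
-- ===== Notes on version B (the rewrite author's own statement) =====
-- stated objective: simpler
-- what changed: The while-loop with accumulator, in-place modulo and swap is replaced by a direct recursion on the Euclidean reduction whose quotients are summed via the return value.
import Mathlib
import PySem

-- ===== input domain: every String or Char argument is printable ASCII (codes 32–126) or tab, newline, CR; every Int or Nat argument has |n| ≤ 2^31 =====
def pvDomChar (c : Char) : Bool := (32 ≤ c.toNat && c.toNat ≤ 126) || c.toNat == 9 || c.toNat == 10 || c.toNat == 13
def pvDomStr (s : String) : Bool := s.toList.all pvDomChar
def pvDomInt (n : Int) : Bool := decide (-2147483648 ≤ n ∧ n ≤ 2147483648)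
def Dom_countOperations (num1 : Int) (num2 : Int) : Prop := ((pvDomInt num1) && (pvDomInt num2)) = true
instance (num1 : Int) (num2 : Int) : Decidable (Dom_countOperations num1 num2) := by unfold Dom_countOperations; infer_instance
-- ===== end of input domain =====

-- B replaces A's while-loop with accumulator by a direct recursion summing the Euclidean quotients (objective: simpler).

-- termination measure: Python's a % b has magnitude strictly below |b| (b ≠ 0)
theorem pyMod_natAbs_lt (a b : Int) (hb : b ≠ 0) :
    (PySem.Int.mod a b).natAbs < b.natAbs := by
  rcases lt_trichotomy b 0 with h | h | h
  · have h1 := PySem.Int.mod_neg_bounds a h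
    omega
  · exact absurd h hb
  · have h1 := PySem.Int.mod_nonneg a h
    have h2 := PySem.Int.mod_lt a h
    omega

-- ===== PORT A =====
-- A's while-loop, transliterated as tail recursion over the loop state (num1, num2, res)
def countOperationsLoop (num1 : Int) (num2 : Int) (res : Int) : Int :=
  if h : num1 = 0 ∨ num2 = 0 then res
  else
    countOperationsLoop num2 (PySem.Int.mod num1 num2)
      (res + PySem.Int.floordiv num1 num2)
termination_by num2.natAbs
decreasing_by exact pyMod_natAbs_lt num1 num2 (by tauto)

def countOperations (num1 : Int) (num2 : Int) : Int :=
  countOperationsLoop num1 num2 0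

-- ===== PORT B =====
def countOperations_alt (num1 : Int) (num2 : Int) : Int :=
  if h : num1 = 0 ∨ num2 = 0 then 0
  else PySem.Int.floordiv num1 num2 + countOperations_alt num2 (PySem.Int.mod num1 num2)
termination_by num2.natAbs
decreasing_by exact pyMod_natAbs_lt num1 num2 (by tauto)

-- ===== PRECONDITION & SPEC =====
def Spec_countOperations (num1 : Int) (num2 : Int) (out : Int) : Prop := out = countOperations_alt num1 num2
instance (num1 : Int) (num2 : Int) (out : Int) : Decidable (Spec_countOperations num1 num2 out) := by unfold Spec_countOperations; infer_instance

-- ===== CLAIM (what is proved, stated in full; the proofs are below) =====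
def Claim_equal_countOperations : Prop := ∀ (num1 : Int) (num2 : Int), Dom_countOperations num1 num2 → Spec_countOperations num1 num2 (countOperations num1 num2)

-- ===== LEMMAS AND PROOFS =====

-- loop invariant: the accumulator threads through as an additive constant
theorem countOperationsLoop_eq_alt (num1 num2 res : Int) :
    countOperationsLoop num1 num2 res = res + countOperations_alt num1 num2 := by
  fun_induction countOperationsLoop num1 num2 res with
  | case1 n1 n2 r h =>
      rw [countOperations_alt]
      simp [h]
  | case2 n1 n2 r h ih =>
      rw [countOperations_alt]
      simp only [dif_neg h]
      rw [ih]
      ring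

-- ===== VERDICT (by name: the statement is the Claim_ definition above) =====
theorem countOperations_spec : Claim_equal_countOperations := by
  intro num1 num2 _
  unfold Spec_countOperations countOperations
  rw [countOperationsLoop_eq_alt]
  ring
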